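-- pv_equiv track=rewrite | github.com/pattonga/Symmetric-Weakly-Separated-Collection-Generator | FindBreakers.py | possible_orbit_extensions
-- ===== SOURCE A (Python) =====
-- from itertools import combinations
-- from math import gcd
--
-- def weakly_separated_correct(A, B, n):
--     A_minus_B = sorted(set(A) - set(B))
--     B_minus_A = sorted(set(B) - set(A))
--     combined = sorted(set(A_minus_B + B_minus_A))
--
--     for i in range(len(combined)):
--         for j in range(i + 1, len(combined)):
--             for k in range(j + 1, len(combined)):
--                 for l in range(k + 1, len(combined)):
--                     a, b, c, d = combined[i], combined[j], combined[k], combined[l]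
--                     if {a, c}.issubset(A_minus_B) and {b, d}.issubset(B_minus_A):
--                         return False
--                     if {a, c}.issubset(B_minus_A) and {b, d}.issubset(A_minus_B):
--                         return False
--     return True
--
-- def add_mod(subset, l, n):
--     return tuple(sorted((x + l - 1) % n + 1 for x in subset))
--
-- def orbit(subset, l, n):
--     result = []
--     current = subset
--     seen = set()
--     for _ in range(n // gcd(n, l)):
--         frozen = tuple(sorted(current))
--         if frozen in seen:
--             break
--         seen.add(frozen)
--         result.append(frozen)
--         current = add_mod(current, l, n)
--     return result
--
-- def is_weakly_separated_all(collection, n):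
--     for i in range(len(collection)):
--         for j in range(i + 1, len(collection)):
--             if not weakly_separated_correct(collection[i], collection[j], n):
--                 return False
--     return True
--
-- def possible_orbit_extensions(current_collection, n, k, l):
--     all_subsets = list(combinations(range(1, n + 1), k))
--     used_orbits = {frozenset(orbit(sub, l, n)) for sub in current_collection}
--     current_set = list(current_collection)
--     max_size = k * (n - k) + 1
--
--     valid_extensions = []
--     for candidate in all_subsets:
--         candidate_orbit = orbit(candidate, l, n)
--         frozen_candidate_orbit = frozenset(candidate_orbit)
--
--         if frozen_candidate_orbit in used_orbits:
--             continue
--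
--         extended_collection = current_set + list(frozen_candidate_orbit)
--
--         if len(extended_collection) > max_size:
--             continue
--
--         if is_weakly_separated_all(extended_collection, n):
--             valid_extensions.append(candidate_orbit)
--
--     return valid_extensions
-- ===== SOURCE B (Python) =====
-- # B: same results, different algorithm: O(m) hull-based weak-separation test instead of the
-- # O(m^4) quadruple loop, and the fixed collection's internal pairs are checked once up front
-- # instead of being re-verified for every candidate; per candidate only orbit-internal and
-- # orbit-vs-collection pairs are tested.
-- from itertools import combinations
-- from math import gcd
--
--
-- def _ws(A, B):
--     # A, B weakly separated <=> no strictly increasing a<b<c<d alternating between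
--     # A-only and B-only elements <=> NOT (some B-only element lies strictly inside the
--     # hull of A-only AND some A-only element lies strictly inside the hull of B-only).
--     sa, sb = set(A), set(B)
--     ao = sa - sb
--     bo = sb - sa
--     if not ao or not bo:
--         return True
--     alo, ahi = min(ao), max(ao)
--     blo, bhi = min(bo), max(bo)
--     return not (any(alo < x < ahi for x in bo) and any(blo < y < bhi for y in ao))
--
--
-- def _pairwise_ws(xs):
--     if not xs:
--         return True
--     head, rest = xs[0], xs[1:]
--     return all(_ws(head, y) for y in rest) and _pairwise_ws(rest)
--
--
-- def _orbit(sub, l, n):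
--     steps = n // gcd(n, l)
--     res = []
--     cur = tuple(sorted(sub))
--     while len(res) < steps and cur not in res:
--         res.append(cur)
--         cur = tuple(sorted((x + l - 1) % n + 1 for x in cur))
--     return res
--
--
-- def possible_orbit_extensions(current_collection, n, k, l):
--     base = list(current_collection)
--     if not _pairwise_ws(base):
--         return []
--     used = [_orbit(sub, l, n) for sub in current_collection]
--     budget = k * (n - k) + 1 - len(base)
--     out = []
--     for cand in combinations(range(1, n + 1), k):
--         orb = _orbit(cand, l, n)
--         so = set(orb)
--         if any(set(u) == so for u in used) or len(orb) > budget: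
--             continue
--         if _pairwise_ws(orb) and all(_ws(c, o) for c in base for o in orb):
--             out.append(orb)
--     return out
-- ===== Notes on version B (the rewrite author's own statement) =====
-- stated objective: faster
-- what changed: The O(m^4) quadruple-loop weak-separation test is replaced by an O(m) hull test (a crossing exists iff each side has an element strictly inside the other side's exclusive hull), and the fixed collection's internal pairs are verified once up front instead of being re-verified inside every candidate's full pairwise check.
import Mathlib
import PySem

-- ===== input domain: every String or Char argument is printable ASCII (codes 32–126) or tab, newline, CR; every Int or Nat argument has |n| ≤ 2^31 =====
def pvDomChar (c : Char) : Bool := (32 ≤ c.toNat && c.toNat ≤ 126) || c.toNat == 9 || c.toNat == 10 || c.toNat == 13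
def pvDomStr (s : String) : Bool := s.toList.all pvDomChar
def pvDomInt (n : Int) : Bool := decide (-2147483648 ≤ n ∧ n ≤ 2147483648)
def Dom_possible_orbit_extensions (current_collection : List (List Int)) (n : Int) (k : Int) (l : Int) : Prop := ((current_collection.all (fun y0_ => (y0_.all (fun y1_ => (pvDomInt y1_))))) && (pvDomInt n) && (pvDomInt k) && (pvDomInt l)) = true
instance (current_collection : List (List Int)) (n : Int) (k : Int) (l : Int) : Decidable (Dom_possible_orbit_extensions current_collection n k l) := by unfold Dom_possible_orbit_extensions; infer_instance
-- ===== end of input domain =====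

-- B is the same function computed by a different algorithm: an O(m) hull test replaces the
-- O(m^4) quadruple loop of the weak-separation check, and the fixed collection's internal
-- pairs are verified once up front instead of inside every candidate's pairwise check.

-- ===== PORT A =====

-- frozenset equality on lists of distinct elements (both arguments are orbits, which are
-- duplicate-free): same members both ways.
def pvSetEq (s t : List (List Int)) : Bool :=
  s.all (fun x => t.contains x) && t.all (fun x => s.contains x)

-- add_mod(subset, l, n)
def pvAdd_mod (subset : List Int) (l n : Int) : List Int :=
  PySem.List.sorted (subset.map (fun x => PySem.Int.mod (x + l - 1) n + 1)) (fun x => x) false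

-- the body of orbit's 'for _ in range(n // gcd(n, l))' loop; 'seen' and 'result' hold the
-- same elements in the same order at all times, exactly as in the Python.
def pvOrbitLoopA (l n : Int) : Nat → List Int → List (List Int) → List (List Int) → List (List Int)
  | 0, _, _, result => result
  | fuel+1, current, seen, result =>
    let frozen := PySem.List.sorted current (fun x => x) false
    if frozen ∈ seen then result
    else pvOrbitLoopA l n fuel (pvAdd_mod current l n) (PySem.Set.add seen frozen) (result ++ [frozen])

-- orbit(subset, l, n); when gcd(n, l) = 0 (n = l = 0) Python raises ZeroDivisionError — excluded by Pre_.
def pvOrbitA (subset : List Int) (l n : Int) : List (List Int) :=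
  let g : Int := (Int.gcd n l : Int)
  if g = 0 then [] else pvOrbitLoopA l n (PySem.Int.floordiv n g).toNat subset [] []

-- weakly_separated_correct(A, B, n): the quadruple index loop with early 'return False' as nested any.
def pvWS_A (A B : List Int) (n : Int) : Bool :=
  let amb := PySem.List.sorted (PySem.Set.diff (PySem.Set.ofList A) (PySem.Set.ofList B)) (fun x => x) false
  let bma := PySem.List.sorted (PySem.Set.diff (PySem.Set.ofList B) (PySem.Set.ofList A)) (fun x => x) false
  let comb := PySem.List.sorted (PySem.Set.ofList (amb ++ bma)) (fun x => x) false
  !((List.range comb.length).any fun i =>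
    (List.range' (i+1) (comb.length - (i+1))).any fun j =>
    (List.range' (j+1) (comb.length - (j+1))).any fun k' =>
    (List.range' (k'+1) (comb.length - (k'+1))).any fun l' =>
      let a := comb.getD i 0
      let b := comb.getD j 0
      let c := comb.getD k' 0
      let d := comb.getD l' 0
      (amb.contains a && amb.contains c && bma.contains b && bma.contains d) ||
      (bma.contains a && bma.contains c && amb.contains b && amb.contains d))

-- is_weakly_separated_all(collection, n)
def pvWSAll_A (coll : List (List Int)) (n : Int) : Bool :=
  !((List.range coll.length).any fun i =>
    (List.range' (i+1) (coll.length - (i+1))).any fun j =>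
      !pvWS_A (coll.getD i []) (coll.getD j []) n)

-- possible_orbit_extensions: 'frozenset(candidate_orbit)' is iterated only through len() and
-- the order-insensitive all-pairs check, so the orbit's own (duplicate-free) order is used for
-- 'list(frozen_candidate_orbit)'; used_orbits membership is frozenset equality (pvSetEq) against
-- the orbits of current_collection (set-level dedup of used_orbits cannot change any membership
-- test). combinations(range(1, n+1), k) raises ValueError for k < 0 — excluded by Pre_.
def possible_orbit_extensions (current_collection : List (List Int)) (n : Int) (k : Int) (l : Int) : List (List (List Int)) :=
  -- CPython's combinations(pool, r) yields nothing when r > len(pool) without enumerating: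
  -- the same short-circuit here (value-equal by PySem.List.combinations_eq_nil_of_length_lt).
  let all_subsets := if k < 0 then []
    else if (PySem.List.pyRange 1 (n+1) 1).length < k.toNat then []
    else PySem.List.combinations (PySem.List.pyRange 1 (n+1) 1) k.toNat
  let used_orbits := current_collection.map (fun sub => pvOrbitA sub l n)
  let max_size := k * (n - k) + 1
  all_subsets.foldl (fun valid_extensions candidate =>
    let candidate_orbit := pvOrbitA candidate l n
    if used_orbits.any (fun o => pvSetEq candidate_orbit o) then valid_extensions
    else if max_size < ((current_collection ++ candidate_orbit).length : Int) then valid_extensions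
    else if pvWSAll_A (current_collection ++ candidate_orbit) n then valid_extensions ++ [candidate_orbit]
    else valid_extensions) []

-- ===== PORT B =====

-- _ws(A, B): hull-based weak-separation test (the unreachable match arm is a totality guard:
-- min?/max? of the nonempty ao/bo are always 'some').
def pvWS_B (A B : List Int) : Bool :=
  let sa := PySem.Set.ofList A
  let sb := PySem.Set.ofList B
  let ao := PySem.Set.diff sa sb
  let bo := PySem.Set.diff sb sa
  if ao.isEmpty || bo.isEmpty then true
  else
    match PySem.List.min? ao (fun x => x), PySem.List.max? ao (fun x => x),
          PySem.List.min? bo (fun x => x), PySem.List.max? bo (fun x => x) with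
    | some alo, some ahi, some blo, some bhi =>
        !((bo.any fun x => decide (alo < x) && decide (x < ahi)) &&
          (ao.any fun y => decide (blo < y) && decide (y < bhi)))
    | _, _, _, _ => true

-- _pairwise_ws(xs)
def pvPairwiseWS_B : List (List Int) → Bool
  | [] => true
  | x :: rest => rest.all (fun y => pvWS_B x y) && pvPairwiseWS_B rest

-- _orbit's while loop: fuel = steps - len(res)
def pvOrbitLoopB (l n : Int) : Nat → List Int → List (List Int) → List (List Int)
  | 0, _, res => res
  | fuel+1, cur, res =>
    if cur ∈ res then res
    else pvOrbitLoopB l n fuel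
      (PySem.List.sorted (cur.map (fun x => PySem.Int.mod (x + l - 1) n + 1)) (fun x => x) false)
      (res ++ [cur])

-- _orbit(sub, l, n); gcd = 0 is the same ZeroDivisionError corner, excluded by Pre_.
def pvOrbitB (sub : List Int) (l n : Int) : List (List Int) :=
  let g : Int := (Int.gcd n l : Int)
  if g = 0 then []
  else pvOrbitLoopB l n (PySem.Int.floordiv n g).toNat (PySem.List.sorted sub (fun x => x) false) []

def possible_orbit_extensions_alt (current_collection : List (List Int)) (n : Int) (k : Int) (l : Int) : List (List (List Int)) :=
  let base := current_collection
  if !pvPairwiseWS_B base then []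
  else
    let used := current_collection.map (fun sub => pvOrbitB sub l n)
    let budget := k * (n - k) + 1 - (base.length : Int)
    -- same r > len(pool) short-circuit of CPython's combinations as in port A
    let cands := if k < 0 then []
      else if (PySem.List.pyRange 1 (n+1) 1).length < k.toNat then []
      else PySem.List.combinations (PySem.List.pyRange 1 (n+1) 1) k.toNat
    cands.foldl (fun out cand =>
      let orb := pvOrbitB cand l n
      if used.any (fun u => pvSetEq u orb) || budget < (orb.length : Int) then out
      else if pvPairwiseWS_B orb && base.all (fun c => orb.all (fun o => pvWS_B c o)) then out ++ [orb]
      else out) []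

-- ===== PRECONDITION & SPEC =====
-- Pre_ excludes exactly the inputs where the Python A raises: k < 0 (ValueError from
-- combinations(range, k)) and n = l = 0 with orbit() actually invoked (ZeroDivisionError
-- from n // gcd(n, l)).
def Pre_possible_orbit_extensions (current_collection : List (List Int)) (n : Int) (k : Int) (l : Int) : Prop :=
  0 ≤ k ∧ (n = 0 ∧ l = 0 → current_collection = [] ∧ k ≠ 0)
instance (current_collection : List (List Int)) (n : Int) (k : Int) (l : Int) : Decidable (Pre_possible_orbit_extensions current_collection n k l) := by unfold Pre_possible_orbit_extensions; infer_instance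
def pvWitness_possible_orbit_extensions : List (List Int) × Int × Int × Int := ([[1, 2]], 4, 2, 1)

def Spec_possible_orbit_extensions (current_collection : List (List Int)) (n : Int) (k : Int) (l : Int) (out : List (List (List Int))) : Prop := out = possible_orbit_extensions_alt current_collection n k l
instance (current_collection : List (List Int)) (n : Int) (k : Int) (l : Int) (out : List (List (List Int))) : Decidable (Spec_possible_orbit_extensions current_collection n k l out) := by unfold Spec_possible_orbit_extensions; infer_instance

-- ===== CLAIM (what is proved, stated in full; the proofs are below) =====
def Claim_equal_possible_orbit_extensions : Prop := ∀ (current_collection : List (List Int)) (n : Int) (k : Int) (l : Int), Dom_possible_orbit_extensions current_collection n k l → Pre_possible_orbit_extensions current_collection n k l → Spec_possible_orbit_extensions current_collection n k l (possible_orbit_extensions current_collection n k l)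

-- ===== LEMMAS AND PROOFS =====

def pvCross (amb bma comb : List Int) : Prop :=
  ∃ a b c d : Int, a ∈ comb ∧ b ∈ comb ∧ c ∈ comb ∧ d ∈ comb ∧ a < b ∧ b < c ∧ c < d ∧
    ((a ∈ amb ∧ c ∈ amb ∧ b ∈ bma ∧ d ∈ bma) ∨ (a ∈ bma ∧ c ∈ bma ∧ b ∈ amb ∧ d ∈ amb))

theorem pvIdx_mono {comb : List Int} (hs : comb.Pairwise (· < ·)) {a b : Int}
    (ha : a ∈ comb) (hb : b ∈ comb) (hab : a < b) : comb.idxOf a < comb.idxOf b := by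
  by_contra h'
  have hle : comb.idxOf b ≤ comb.idxOf a := Nat.le_of_not_lt h'
  have hia : comb.idxOf a < comb.length := List.idxOf_lt_length_of_mem ha
  have hib : comb.idxOf b < comb.length := List.idxOf_lt_length_of_mem hb
  rcases Nat.eq_or_lt_of_le hle with heq | hlt
  · have : b = a := by
      calc b = comb[comb.idxOf b] := (List.getElem_idxOf hib).symm
        _ = comb[comb.idxOf a] := by simp [heq]
        _ = a := List.getElem_idxOf hia
    omega
  · have := List.pairwise_iff_getElem.mp hs _ _ hib hia hlt
    rw [List.getElem_idxOf hib, List.getElem_idxOf hia] at this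
    omega

theorem pvQuad_iff (amb bma comb : List Int) (hs : comb.Pairwise (· < ·)) :
    ((List.range comb.length).any fun i =>
      (List.range' (i+1) (comb.length - (i+1))).any fun j =>
      (List.range' (j+1) (comb.length - (j+1))).any fun k' =>
      (List.range' (k'+1) (comb.length - (k'+1))).any fun l' =>
        (amb.contains (comb.getD i 0) && amb.contains (comb.getD k' 0) &&
         bma.contains (comb.getD j 0) && bma.contains (comb.getD l' 0)) ||
        (bma.contains (comb.getD i 0) && bma.contains (comb.getD k' 0) &&
         amb.contains (comb.getD j 0) && amb.contains (comb.getD l' 0))) = true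
  ↔ pvCross amb bma comb := by
  unfold pvCross
  simp only [List.any_eq_true, List.mem_range, List.mem_range'_1, Bool.or_eq_true,
    Bool.and_eq_true, List.contains_iff_mem]
  constructor
  · rintro ⟨i, hi, j, ⟨hj1, hj2⟩, k', ⟨hk1, hk2⟩, l', ⟨hl1, hl2⟩, hpat⟩
    have hj : j < comb.length := by omega
    have hk : k' < comb.length := by omega
    have hl : l' < comb.length := by omega
    rw [List.getD_eq_getElem _ _ hi, List.getD_eq_getElem _ _ hj,
        List.getD_eq_getElem _ _ hk, List.getD_eq_getElem _ _ hl] at hpat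
    refine ⟨comb[i], comb[j], comb[k'], comb[l'], List.getElem_mem hi, List.getElem_mem hj,
      List.getElem_mem hk, List.getElem_mem hl, ?_, ?_, ?_, ?_⟩
    · exact List.pairwise_iff_getElem.mp hs _ _ hi hj (by omega)
    · exact List.pairwise_iff_getElem.mp hs _ _ hj hk (by omega)
    · exact List.pairwise_iff_getElem.mp hs _ _ hk hl (by omega)
    · tauto
  · rintro ⟨a, b, c, d, hac, hbc', hcc, hdc, hab, hbc, hcd, hpat⟩
    have h1 := pvIdx_mono hs hac hbc' hab
    have h2 := pvIdx_mono hs hbc' hcc hbc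
    have h3 := pvIdx_mono hs hcc hdc hcd
    have hia : comb.idxOf a < comb.length := List.idxOf_lt_length_of_mem hac
    have hib : comb.idxOf b < comb.length := List.idxOf_lt_length_of_mem hbc'
    have hic : comb.idxOf c < comb.length := List.idxOf_lt_length_of_mem hcc
    have hid : comb.idxOf d < comb.length := List.idxOf_lt_length_of_mem hdc
    refine ⟨comb.idxOf a, hia, comb.idxOf b, ⟨by omega, by omega⟩,
      comb.idxOf c, ⟨by omega, by omega⟩, comb.idxOf d, ⟨by omega, by omega⟩, ?_⟩
    rw [List.getD_eq_getElem _ _ hia, List.getD_eq_getElem _ _ hib,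
        List.getD_eq_getElem _ _ hic, List.getD_eq_getElem _ _ hid,
        List.getElem_idxOf hia, List.getElem_idxOf hib,
        List.getElem_idxOf hic, List.getElem_idxOf hid]
    tauto

theorem pvCross_iff_hull {ao bo amb bma comb : List Int}
    (hdisj : ∀ x, x ∈ ao → x ∉ bo)
    (hamb : ∀ x, x ∈ amb ↔ x ∈ ao) (hbma : ∀ x, x ∈ bma ↔ x ∈ bo)
    (hcomb : ∀ x, x ∈ comb ↔ x ∈ amb ∨ x ∈ bma)
    {alo ahi blo bhi : Int}
    (halo : alo ∈ ao) (hahi : ahi ∈ ao) (hblo : blo ∈ bo) (hbhi : bhi ∈ bo)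
    (hmina : ∀ y ∈ ao, alo ≤ y) (hmaxa : ∀ y ∈ ao, y ≤ ahi)
    (hminb : ∀ y ∈ bo, blo ≤ y) (hmaxb : ∀ y ∈ bo, y ≤ bhi) :
    pvCross amb bma comb ↔
      (∃ x ∈ bo, alo < x ∧ x < ahi) ∧ (∃ y ∈ ao, blo < y ∧ y < bhi) := by
  constructor
  · rintro ⟨a, b, c, d, -, -, -, -, hab, hbc, hcd, hpat⟩
    rcases hpat with ⟨ha, hc, hb, hd⟩ | ⟨ha, hc, hb, hd⟩
    · rw [hamb] at ha hc; rw [hbma] at hb hd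
      exact ⟨⟨b, hb, lt_of_le_of_lt (hmina a ha) hab, lt_of_lt_of_le hbc (hmaxa c hc)⟩,
             ⟨c, hc, lt_of_le_of_lt (hminb b hb) hbc, lt_of_lt_of_le hcd (hmaxb d hd)⟩⟩
    · rw [hbma] at ha hc; rw [hamb] at hb hd
      exact ⟨⟨c, hc, lt_of_le_of_lt (hmina b hb) hbc, lt_of_lt_of_le hcd (hmaxa d hd)⟩,
             ⟨b, hb, lt_of_le_of_lt (hminb a ha) hab, lt_of_lt_of_le hbc (hmaxb c hc)⟩⟩
  · rintro ⟨⟨x, hx, hx1, hx2⟩, ⟨y, hy, hy1, hy2⟩⟩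
    have hxy : x ≠ y := fun h => hdisj y hy (h ▸ hx)
    have hmem : ∀ z ∈ ao, z ∈ comb := fun z hz => (hcomb z).mpr (Or.inl ((hamb z).mpr hz))
    have hmem' : ∀ z ∈ bo, z ∈ comb := fun z hz => (hcomb z).mpr (Or.inr ((hbma z).mpr hz))
    rcases lt_or_gt_of_ne hxy with hlt | hgt
    · exact ⟨alo, x, y, bhi, hmem _ halo, hmem' _ hx, hmem _ hy, hmem' _ hbhi,
        hx1, hlt, hy2, Or.inl ⟨(hamb _).mpr halo, (hamb _).mpr hy, (hbma _).mpr hx, (hbma _).mpr hbhi⟩⟩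
    · exact ⟨blo, y, x, ahi, hmem' _ hblo, hmem _ hy, hmem' _ hx, hmem _ hahi,
        hy1, hgt, hx2, Or.inr ⟨(hbma _).mpr hblo, (hbma _).mpr hx, (hamb _).mpr hy, (hamb _).mpr hahi⟩⟩
theorem pvWS_eq (A B : List Int) (n : Int) : pvWS_A A B n = pvWS_B A B := by
  simp only [pvWS_A, pvWS_B]
  set sa := PySem.Set.ofList A with hsa
  set sb := PySem.Set.ofList B with hsb
  set ao := PySem.Set.diff sa sb with hao
  set bo := PySem.Set.diff sb sa with hbo
  set amb := PySem.List.sorted ao (fun x => x) false with hamb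
  set bma := PySem.List.sorted bo (fun x => x) false with hbma
  set comb := PySem.List.sorted (PySem.Set.ofList (amb ++ bma)) (fun x => x) false with hcomb
  have hmem_amb : ∀ x, x ∈ amb ↔ x ∈ ao := fun x => by rw [hamb, PySem.List.mem_sorted]
  have hmem_bma : ∀ x, x ∈ bma ↔ x ∈ bo := fun x => by rw [hbma, PySem.List.mem_sorted]
  have hmem_comb : ∀ x, x ∈ comb ↔ x ∈ amb ∨ x ∈ bma := fun x => by
    rw [hcomb, PySem.List.mem_sorted, PySem.Set.mem_ofList, List.mem_append]
  have hdisj : ∀ x, x ∈ ao → x ∉ bo := by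
    intro x hx hx'
    rw [hao, PySem.Set.mem_diff] at hx
    rw [hbo, PySem.Set.mem_diff] at hx'
    exact hx.2 hx'.1
  have hsorted : comb.Pairwise (· < ·) := by
    rw [hcomb]; exact PySem.List.sorted_ofList_pairwise_lt _
  by_cases hea : ao = []
  · have hambe : amb = [] := by rw [hamb, hea]; rfl
    have hA : pvCross amb bma comb → False := by
      rintro ⟨a, b, c, d, -, -, -, -, -, -, -, ⟨ha, -⟩ | ⟨-, -, hb, -⟩⟩
      · rw [hambe] at ha; exact (List.not_mem_nil).elim ha
      · rw [hambe] at hb; exact (List.not_mem_nil).elim hb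
    rw [hea]
    simp only [List.isEmpty_nil, Bool.true_or, if_true]
    rw [Bool.not_eq_true']
    apply Bool.eq_false_iff.mpr
    intro hq
    exact hA ((pvQuad_iff amb bma comb hsorted).mp hq)
  · by_cases heb : bo = []
    · have hbmae : bma = [] := by rw [hbma, heb]; rfl
      have hA : pvCross amb bma comb → False := by
        rintro ⟨a, b, c, d, -, -, -, -, -, -, -, ⟨-, -, hb, -⟩ | ⟨ha, -⟩⟩
        · rw [hbmae] at hb; exact (List.not_mem_nil).elim hb
        · rw [hbmae] at ha; exact (List.not_mem_nil).elim ha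
      rw [heb]
      simp only [List.isEmpty_nil, Bool.or_true, if_true]
      rw [Bool.not_eq_true']
      apply Bool.eq_false_iff.mpr
      intro hq
      exact hA ((pvQuad_iff amb bma comb hsorted).mp hq)
    · have heaI : ao.isEmpty = false := by simpa [List.isEmpty_iff] using hea
      have hebI : bo.isEmpty = false := by simpa [List.isEmpty_iff] using heb
      obtain ⟨alo, halo⟩ : ∃ v, PySem.List.min? ao (fun x => x) = some v := by
        cases h : PySem.List.min? ao (fun x => x) with
        | none => exact absurd ((PySem.List.min?_eq_none_iff ao (fun x => x)).mp h) hea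
        | some v => exact ⟨v, rfl⟩
      obtain ⟨ahi, hahi⟩ : ∃ v, PySem.List.max? ao (fun x => x) = some v := by
        cases h : PySem.List.max? ao (fun x => x) with
        | none => exact absurd ((PySem.List.max?_eq_none_iff ao (fun x => x)).mp h) hea
        | some v => exact ⟨v, rfl⟩
      obtain ⟨blo, hblo⟩ : ∃ v, PySem.List.min? bo (fun x => x) = some v := by
        cases h : PySem.List.min? bo (fun x => x) with
        | none => exact absurd ((PySem.List.min?_eq_none_iff bo (fun x => x)).mp h) heb
        | some v => exact ⟨v, rfl⟩
      obtain ⟨bhi, hbhi⟩ : ∃ v, PySem.List.max? bo (fun x => x) = some v := by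
        cases h : PySem.List.max? bo (fun x => x) with
        | none => exact absurd ((PySem.List.max?_eq_none_iff bo (fun x => x)).mp h) heb
        | some v => exact ⟨v, rfl⟩
      rw [heaI, hebI, halo, hahi, hblo, hbhi]
      simp only [Bool.or_self]
      congr 1
      apply Bool.coe_iff_coe.mp
      rw [pvQuad_iff amb bma comb hsorted]
      rw [pvCross_iff_hull hdisj hmem_amb hmem_bma hmem_comb
        (PySem.List.min?_mem halo) (PySem.List.max?_mem hahi)
        (PySem.List.min?_mem hblo) (PySem.List.max?_mem hbhi)
        (PySem.List.min?_isMin halo) (PySem.List.max?_isMax hahi)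
        (PySem.List.min?_isMin hblo) (PySem.List.max?_isMax hbhi)]
      simp [List.any_eq_true, And.comm]

theorem pvSetEq_comm (s t : List (List Int)) : pvSetEq s t = pvSetEq t s := by
  unfold pvSetEq; exact Bool.and_comm _ _

theorem pvPairwiseWS_B_iff (xs : List (List Int)) :
    pvPairwiseWS_B xs = true ↔ xs.Pairwise (fun x y => pvWS_B x y = true) := by
  induction xs with
  | nil => simp [pvPairwiseWS_B]
  | cons x rest ih => simp [pvPairwiseWS_B, List.pairwise_cons, ih, List.all_eq_true]

theorem pvOrbitLoop_eq (l n : Int) (fuel : Nat) :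
    ∀ (current : List Int) (res : List (List Int)),
      pvOrbitLoopA l n fuel current res res
        = pvOrbitLoopB l n fuel (PySem.List.sorted current (fun x => x) false) res := by
  induction fuel with
  | zero => intro current res; rfl
  | succ fuel ih =>
    intro current res
    simp only [pvOrbitLoopA, pvOrbitLoopB]
    by_cases h : PySem.List.sorted current (fun x => x) false ∈ res
    · simp [h]
    · simp only [h, if_false]
      rw [PySem.Set.add_of_not_mem h, ih]
      have hsort : PySem.List.sorted (pvAdd_mod current l n) (fun x => x) false
          = PySem.List.sorted ((PySem.List.sorted current (fun x => x) false).map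
              (fun x => PySem.Int.mod (x + l - 1) n + 1)) (fun x => x) false := by
        unfold pvAdd_mod
        rw [PySem.List.sorted_sorted]
        exact (PySem.List.sorted_eq_sorted_of_perm _ _ _ (fun a b hab => hab)
          ((PySem.List.sorted_perm current (fun x => x) false).map _)).symm
      rw [hsort]

theorem pvOrbit_eq (sub : List Int) (l n : Int) : pvOrbitA sub l n = pvOrbitB sub l n := by
  unfold pvOrbitA pvOrbitB
  by_cases h : (Int.gcd n l : Int) = 0
  · simp [h]
  · simp only [h, if_false]
    exact pvOrbitLoop_eq l n _ sub []

theorem pvWSAll_A_iff (xs : List (List Int)) (n : Int) :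
    pvWSAll_A xs n = true ↔ xs.Pairwise (fun x y => pvWS_A x y n = true) := by
  rw [List.pairwise_iff_getElem]
  unfold pvWSAll_A
  rw [Bool.not_eq_true', Bool.eq_false_iff, ne_eq]
  simp only [List.any_eq_true, List.mem_range, List.mem_range'_1, Bool.not_eq_true']
  push Not
  simp only [Bool.not_eq_false]
  constructor
  · intro h i j hi hj hij
    have := h i hi j ⟨by omega, by omega⟩
    rwa [List.getD_eq_getElem _ _ hi, List.getD_eq_getElem _ _ hj] at this
  · intro h i hi j hj
    have hj' : j < xs.length := by omega
    rw [List.getD_eq_getElem _ _ hi, List.getD_eq_getElem _ _ hj']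
    exact h i j hi hj' (by omega)
theorem pvWSAll_append (cc orb : List (List Int)) (n : Int) :
    pvWSAll_A (cc ++ orb) n
      = (pvPairwiseWS_B cc && (pvPairwiseWS_B orb &&
          cc.all (fun c => orb.all (fun o => pvWS_B c o)))) := by
  apply Bool.coe_iff_coe.mp
  rw [pvWSAll_A_iff, List.pairwise_append]
  simp only [Bool.and_eq_true, pvPairwiseWS_B_iff, List.all_eq_true, pvWS_eq]

theorem pvStep_eq (cc : List (List Int)) (n k l : Int) (hbase : pvPairwiseWS_B cc = true)
    (acc : List (List (List Int))) (cand : List Int) :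
    (if (cc.map (fun sub => pvOrbitA sub l n)).any (fun o => pvSetEq (pvOrbitA cand l n) o) then acc
     else if k * (n - k) + 1 < ((cc ++ pvOrbitA cand l n).length : Int) then acc
     else if pvWSAll_A (cc ++ pvOrbitA cand l n) n then acc ++ [pvOrbitA cand l n]
     else acc)
    = (if ((cc.map (fun sub => pvOrbitB sub l n)).any (fun u => pvSetEq u (pvOrbitB cand l n))
          || decide (k * (n - k) + 1 - (cc.length : Int) < ((pvOrbitB cand l n).length : Int))) = true then acc
       else if (pvPairwiseWS_B (pvOrbitB cand l n)
                && cc.all (fun c => (pvOrbitB cand l n).all (fun o => pvWS_B c o))) = true then acc ++ [pvOrbitB cand l n]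
       else acc) := by
  simp only [← pvOrbit_eq, List.length_append, Nat.cast_add]
  have h1 : ((cc.map (fun sub => pvOrbitA sub l n)).any (fun u => pvSetEq u (pvOrbitA cand l n)))
      = ((cc.map (fun sub => pvOrbitA sub l n)).any (fun o => pvSetEq (pvOrbitA cand l n) o)) :=
    PySem.List.any_congr_mem (fun x _ => pvSetEq_comm x (pvOrbitA cand l n))
  have h2 : (k * (n - k) + 1 - (cc.length : Int) < ((pvOrbitA cand l n).length : Int))
      ↔ (k * (n - k) + 1 < ((cc.length : Int) + ((pvOrbitA cand l n).length : Int))) := by omega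
  rw [h1, pvWSAll_append cc _ n, hbase, Bool.true_and]
  by_cases hu : (cc.map (fun sub => pvOrbitA sub l n)).any (fun o => pvSetEq (pvOrbitA cand l n) o) = true
  · simp [hu]
  · have hu' : (cc.map (fun sub => pvOrbitA sub l n)).any (fun o => pvSetEq (pvOrbitA cand l n) o) = false :=
      by simpa using hu
    by_cases hs : k * (n - k) + 1 < ((cc.length : Int) + ((pvOrbitA cand l n).length : Int))
    · simp [hu', hs, h2]
    · simp [hu', hs, h2]

theorem pvStep_id (cc : List (List Int)) (n k l : Int) (hbase : pvPairwiseWS_B cc = false)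
    (acc : List (List (List Int))) (cand : List Int) :
    (if (cc.map (fun sub => pvOrbitA sub l n)).any (fun o => pvSetEq (pvOrbitA cand l n) o) then acc
     else if k * (n - k) + 1 < ((cc ++ pvOrbitA cand l n).length : Int) then acc
     else if pvWSAll_A (cc ++ pvOrbitA cand l n) n then acc ++ [pvOrbitA cand l n]
     else acc) = acc := by
  rw [pvWSAll_append, hbase, Bool.false_and]
  split_ifs <;> simp_all

theorem main_eq (cc : List (List Int)) (n k l : Int) :
    possible_orbit_extensions cc n k l = possible_orbit_extensions_alt cc n k l := by
  simp only [possible_orbit_extensions, possible_orbit_extensions_alt]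
  by_cases hbase : pvPairwiseWS_B cc = true
  · rw [hbase]
    simp only [Bool.not_true, Bool.false_eq_true, if_false]
    exact PySem.List.foldl_congr_mem _ _ _ _ (fun acc x _ => pvStep_eq cc n k l hbase acc x)
  · have hb' : pvPairwiseWS_B cc = false := by simpa using hbase
    rw [hb']
    simp only [Bool.not_false, if_true]
    rw [PySem.List.foldl_congr_mem _ _ (fun acc _ => acc) _
      (fun acc x _ => pvStep_id cc n k l hb' acc x)]
    exact PySem.List.foldl_ignore _ _

-- ===== VERDICT (by name: the statement is the Claim_ definition above) =====
theorem possible_orbit_extensions_spec : Claim_equal_possible_orbit_extensions := by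
  intro current_collection n k l _ _
  unfold Spec_possible_orbit_extensions
  exact main_eq current_collection n k l
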